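-- pv_equiv track=rewrite | github.com/jmz0407/MyUAVSIM | mac/BasicStdma.py | _find_available_slot
-- ===== SOURCE A (Python) =====
-- def _find_available_slot(node_id, schedule, interference_graph):
--     """为节点找到可用的时隙
--
--     使用贪心着色算法 - 找到可用的最小时隙索引
--     """
--     # 获取该节点的干扰邻居
--     interfering_nodes = interference_graph.get(node_id, set())
--
--     # 找出邻居已占用的时隙
--     occupied_slots = set()
--     for slot, nodes in schedule.items():
--         for neighbor in interfering_nodes:
--             if neighbor in nodes:
--                 occupied_slots.add(slot)
--                 break
--
--     # 找到可用的最小时隙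
--     slot = 0
--     while slot in occupied_slots:
--         slot += 1
--
--     return slot
-- ===== SOURCE B (Python) =====
-- def _find_available_slot(node_id, schedule, interference_graph):
--     """Lazy greedy search: probe slots from 0 upward, checking only the
--     schedule entries actually probed; never builds the occupied set."""
--     interfering_nodes = interference_graph.get(node_id, ())
--     slot = 0
--     while any(n in schedule.get(slot, ()) for n in interfering_nodes):
--         slot += 1
--     return slot
-- ===== Notes on version B (the rewrite author's own statement) =====
-- stated objective: simpler
-- what changed: Replaces A's two-phase algorithm (materialize the full occupied-slot set over the whole schedule, then probe from 0) with a single lazy loop that probes slot 0,1,2,... and looks up only the probed slot in the schedule, never building the occupied set; Pre_ requires the schedule association list to have pairwise-distinct slot keys, since a duplicate-key list corresponds to no Python dict and the ports' first-match vs scan-all readings of it are both accidental.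
import Mathlib
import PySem

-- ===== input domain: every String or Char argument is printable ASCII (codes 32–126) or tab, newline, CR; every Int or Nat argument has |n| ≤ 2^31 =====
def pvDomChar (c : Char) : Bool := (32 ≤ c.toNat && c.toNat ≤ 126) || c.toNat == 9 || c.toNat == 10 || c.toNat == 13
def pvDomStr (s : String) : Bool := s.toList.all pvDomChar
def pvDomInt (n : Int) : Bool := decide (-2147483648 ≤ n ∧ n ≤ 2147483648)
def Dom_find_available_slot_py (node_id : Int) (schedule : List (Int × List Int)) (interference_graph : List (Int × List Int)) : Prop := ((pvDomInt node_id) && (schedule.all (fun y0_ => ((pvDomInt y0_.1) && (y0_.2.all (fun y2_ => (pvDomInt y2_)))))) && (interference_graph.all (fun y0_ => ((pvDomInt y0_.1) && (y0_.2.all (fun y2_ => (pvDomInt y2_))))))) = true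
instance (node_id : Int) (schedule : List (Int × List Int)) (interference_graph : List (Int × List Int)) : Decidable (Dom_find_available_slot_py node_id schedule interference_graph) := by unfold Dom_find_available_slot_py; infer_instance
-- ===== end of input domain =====

-- B replaces A's two-phase "build the occupied set, then probe from 0" with a single
-- lazy probe loop that looks up only the slots it actually visits (objective: simpler).

-- termination lemma cited by both loops: stepping past a slot that occurs in the list
-- strictly decreases the number of list elements ≥ the current slot
theorem pvCountP_lt (l : List Int) (s : Int) (h : s ∈ l) :
    l.countP (fun x => decide (s + 1 ≤ x)) < l.countP (fun x => decide (s ≤ x)) := by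
  induction l with
  | nil => cases h
  | cons a t ih =>
    simp only [List.countP_cons]
    have hle : t.countP (fun x => decide (s + 1 ≤ x)) ≤ t.countP (fun x => decide (s ≤ x)) := by
      apply List.countP_mono_left
      intro x _ hx
      simp only [decide_eq_true_eq] at hx ⊢
      omega
    rcases List.mem_cons.mp h with heq | hmem
    · subst heq
      rw [if_neg (by simp), if_pos (by simp)]
      omega
    · have hst := ih hmem
      have hmono : (if decide (s + 1 ≤ a) = true then 1 else 0) ≤ (if decide (s ≤ a) = true then 1 else 0) := by
        split_ifs with h1 h2 <;> simp_all <;> omega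
      omega

-- ===== PORT A =====
-- the 'slot = 0; while slot in occupied_slots: slot += 1' loop of A
def pvFreeFrom (occupied : PySem.Set Int) (slot : Int) : Int :=
  if h : PySem.Set.contains occupied slot then pvFreeFrom occupied (slot + 1) else slot
termination_by occupied.countP (fun x => decide (slot ≤ x))
decreasing_by
  exact pvCountP_lt occupied slot (by simpa using h)

def find_available_slot_py (node_id : Int) (schedule : List (Int × List Int)) (interference_graph : List (Int × List Int)) : Int :=
  let interfering_nodes := (PySem.Dict.mk interference_graph).getD node_id []
  let occupied_slots : PySem.Set Int := schedule.foldl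
    (fun acc p => if interfering_nodes.any (fun n => p.2.contains n) then PySem.Set.add acc p.1 else acc)
    PySem.Set.empty
  pvFreeFrom occupied_slots 0

-- ===== PORT B =====
-- termination lemma cited by pvProbeFrom: an occupied probe is a key of the schedule
theorem pvProbeKey (schedule : List (Int × List Int)) (interfering : List Int) (slot : Int)
    (h : interfering.any (fun n => ((PySem.Dict.mk schedule).getD slot []).contains n) = true) :
    slot ∈ schedule.map Prod.fst := by
  induction schedule with
  | nil =>
    simp [PySem.Dict.getD_eq_get?_getD, PySem.Dict.get?] at h
  | cons p t ih =>
    by_cases hk : p.1 = slot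
    · simp [hk]
    · right
      apply ih
      rw [PySem.Dict.getD_eq_get?_getD] at h ⊢
      rw [show (PySem.Dict.mk (p :: t)).get? slot = (PySem.Dict.mk t).get? slot from by
        rcases p with ⟨k, v⟩
        rw [PySem.Dict.get?_mk_cons]
        simp_all] at h
      exact h

-- the 'slot = 0; while any(n in schedule.get(slot, ()) ...): slot += 1' loop of B
def pvProbeFrom (interfering : List Int) (schedule : List (Int × List Int)) (slot : Int) : Int :=
  if h : interfering.any (fun n => ((PySem.Dict.mk schedule).getD slot []).contains n) then
    pvProbeFrom interfering schedule (slot + 1)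
  else slot
termination_by (schedule.map Prod.fst).countP (fun k => decide (slot ≤ k))
decreasing_by
  exact pvCountP_lt _ slot (pvProbeKey schedule interfering slot h)

def find_available_slot_py_alt (node_id : Int) (schedule : List (Int × List Int)) (interference_graph : List (Int × List Int)) : Int :=
  let interfering_nodes := (PySem.Dict.mk interference_graph).getD node_id []
  pvProbeFrom interfering_nodes schedule 0

-- ===== PRECONDITION & SPEC =====
-- Pre_ excludes schedules whose association list has duplicate slot keys: such a list
-- corresponds to no Python dict (dict keys are unique), so neither port's reading of it
-- (A scans all entries, B takes the first match) is specified by the Python programs.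
def Pre_find_available_slot_py (node_id : Int) (schedule : List (Int × List Int)) (interference_graph : List (Int × List Int)) : Prop :=
  (schedule.map Prod.fst).Nodup
instance (node_id : Int) (schedule : List (Int × List Int)) (interference_graph : List (Int × List Int)) : Decidable (Pre_find_available_slot_py node_id schedule interference_graph) := by unfold Pre_find_available_slot_py; infer_instance

def pvWitness_find_available_slot_py : Int × (List (Int × List Int)) × (List (Int × List Int)) :=
  (0, [(0, [1]), (1, [2])], [(0, [1])])

def Spec_find_available_slot_py (node_id : Int) (schedule : List (Int × List Int)) (interference_graph : List (Int × List Int)) (out : Int) : Prop := out = find_available_slot_py_alt node_id schedule interference_graph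
instance (node_id : Int) (schedule : List (Int × List Int)) (interference_graph : List (Int × List Int)) (out : Int) : Decidable (Spec_find_available_slot_py node_id schedule interference_graph out) := by unfold Spec_find_available_slot_py; infer_instance

-- ===== CLAIM (what is proved, stated in full; the proofs are below) =====
def Claim_equal_find_available_slot_py : Prop := ∀ (node_id : Int) (schedule : List (Int × List Int)) (interference_graph : List (Int × List Int)), Dom_find_available_slot_py node_id schedule interference_graph → Pre_find_available_slot_py node_id schedule interference_graph → Spec_find_available_slot_py node_id schedule interference_graph (find_available_slot_py node_id schedule interference_graph)

-- ===== LEMMAS AND PROOFS =====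

-- membership in A's occupied-set fold
theorem pvMemFold (I : List Int) (l : List (Int × List Int)) (acc : PySem.Set Int) (s : Int) :
    s ∈ l.foldl (fun acc p => if I.any (fun n => p.2.contains n) then PySem.Set.add acc p.1 else acc) acc
      ↔ s ∈ acc ∨ ∃ p ∈ l, p.1 = s ∧ I.any (fun n => p.2.contains n) = true := by
  induction l generalizing acc with
  | nil => simp
  | cons q t ih =>
    simp only [List.foldl_cons]
    by_cases hc : I.any (fun n => q.2.contains n) = true
    · rw [hc, if_pos rfl, ih]
      simp only [PySem.Set.mem_add, List.mem_cons]
      constructor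
      · rintro ((h | rfl) | ⟨p, hp, rfl, hpc⟩)
        · exact Or.inl h
        · exact Or.inr ⟨q, Or.inl rfl, rfl, hc⟩
        · exact Or.inr ⟨p, Or.inr hp, rfl, hpc⟩
      · rintro (h | ⟨p, (rfl | hp), rfl, hpc⟩)
        · exact Or.inl (Or.inl h)
        · exact Or.inl (Or.inr rfl)
        · exact Or.inr ⟨p, hp, rfl, hpc⟩
    · rw [if_neg hc, ih]
      simp only [List.mem_cons]
      constructor
      · rintro (h | ⟨p, hp, rfl, hpc⟩)
        · exact Or.inl h
        · exact Or.inr ⟨p, Or.inr hp, rfl, hpc⟩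
      · rintro (h | ⟨p, (rfl | hp), rfl, hpc⟩)
        · exact Or.inl h
        · exact absurd hpc hc
        · exact Or.inr ⟨p, hp, rfl, hpc⟩

-- B's first-match lookup characterised on nodup-key lists
theorem pvLookupChar (I : List Int) (l : List (Int × List Int)) (hnd : (l.map Prod.fst).Nodup) (s : Int) :
    I.any (fun n => ((PySem.Dict.mk l).getD s []).contains n) = true
      ↔ ∃ p ∈ l, p.1 = s ∧ I.any (fun n => p.2.contains n) = true := by
  induction l with
  | nil =>
    simp [PySem.Dict.getD_eq_get?_getD, PySem.Dict.get?]
  | cons q t ih =>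
    rcases q with ⟨k, v⟩
    simp only [List.map_cons, List.nodup_cons] at hnd
    rw [PySem.Dict.getD_eq_get?_getD, PySem.Dict.get?_mk_cons]
    by_cases hk : k = s
    · subst hk
      rw [if_pos (beq_self_eq_true k), Option.getD_some]
      constructor
      · intro h
        exact ⟨(k, v), List.mem_cons_self .., rfl, h⟩
      · rintro ⟨⟨p1, p2⟩, hp, rfl, hpc⟩
        rcases List.mem_cons.mp hp with heq | hpt
        · injection heq with h1 h2
          subst h2
          exact hpc
        · exact absurd (List.mem_map.mpr ⟨(p1, p2), hpt, rfl⟩) hnd.1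
    · rw [if_neg (by simpa using hk), ← PySem.Dict.getD_eq_get?_getD, ih hnd.2]
      constructor
      · rintro ⟨p, hp, rfl, hpc⟩
        exact ⟨p, List.mem_cons_of_mem _ hp, rfl, hpc⟩
      · rintro ⟨p, hp, rfl, hpc⟩
        rcases List.mem_cons.mp hp with rfl | hpt
        · exact absurd rfl hk
        · exact ⟨p, hpt, rfl, hpc⟩

-- the two loops agree when their slot predicates agree pointwise
theorem pvLoopEq (I : List Int) (schedule : List (Int × List Int)) (occ : PySem.Set Int)
    (hpt : ∀ s : Int, (PySem.Set.contains occ s = true) ↔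
      I.any (fun n => ((PySem.Dict.mk schedule).getD s []).contains n) = true) :
    ∀ slot, pvFreeFrom occ slot = pvProbeFrom I schedule slot := by
  intro slot
  fun_induction pvFreeFrom occ slot with
  | case1 slot h ih =>
    rw [ih]
    conv_rhs => rw [pvProbeFrom, dif_pos ((hpt slot).mp h)]
  | case2 slot h =>
    have hb : ¬ ((I.any (fun n => ((PySem.Dict.mk schedule).getD slot []).contains n)) = true) :=
      fun hc => h ((hpt slot).mpr hc)
    conv_rhs => rw [pvProbeFrom, dif_neg hb]

-- ===== VERDICT (by name: the statement is the Claim_ definition above) =====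
theorem find_available_slot_py_spec : Claim_equal_find_available_slot_py := by
  intro node_id schedule interference_graph _ hpre
  unfold Spec_find_available_slot_py find_available_slot_py find_available_slot_py_alt
  apply pvLoopEq
  intro s
  rw [PySem.Set.contains_iff, pvMemFold, pvLookupChar _ _ hpre]
  simp
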